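-- pv_equiv track=rewrite | github.com/Alisa-Mikulina/algorithms-and-data-structures | Sem1/LAB1/Lab 2. Task 2.py | intuitive_sorting
-- ===== SOURCE A (Python) =====
-- def intuitive_sorting(massive, length, indexes):
--     for i in range(length):
--         counter = i
--         while massive[i] < massive[counter-1]:
--             counter = counter - 1
--         massive.insert(max(counter,0), massive[i])
--         indexes.append(max(counter,0) + 1)
--         massive.pop(i + 1)
--     return [indexes, massive]
-- ===== SOURCE B (Python) =====
-- def intuitive_sorting(massive, length, indexes):
--     n = length if length > 0 else 0
--     prefix = massive[:n]
--     for i, v in enumerate(prefix):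
--         indexes.append(sum(1 for u in prefix[:i] if u <= v) + 1)
--     massive[:n] = sorted(prefix)
--     return [indexes, massive]
-- ===== Notes on version B (the rewrite author's own statement) =====
-- stated objective: simpler
-- what changed: B replaces A's in-place insertion sort (backward scan with negative-index wraparound, insert+pop per element) by a direct formulation: each rank is the count of earlier prefix elements <= the current one, plus 1, and the array is produced by one library sorted() call on the prefix.
import Mathlib
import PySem

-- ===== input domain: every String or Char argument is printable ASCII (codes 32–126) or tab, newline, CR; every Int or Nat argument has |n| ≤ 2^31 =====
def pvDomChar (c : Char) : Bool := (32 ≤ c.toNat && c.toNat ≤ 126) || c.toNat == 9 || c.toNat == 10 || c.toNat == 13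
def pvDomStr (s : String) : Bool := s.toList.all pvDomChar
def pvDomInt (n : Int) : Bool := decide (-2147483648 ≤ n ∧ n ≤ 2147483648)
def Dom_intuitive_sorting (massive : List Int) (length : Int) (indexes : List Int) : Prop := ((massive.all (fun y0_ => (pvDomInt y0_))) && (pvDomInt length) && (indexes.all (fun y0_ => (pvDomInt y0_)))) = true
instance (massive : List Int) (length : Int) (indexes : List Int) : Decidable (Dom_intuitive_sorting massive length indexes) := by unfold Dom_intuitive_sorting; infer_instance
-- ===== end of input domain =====

-- B replaces A's in-place insertion sort (backward scan, insert+pop per element) by direct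
-- counting of earlier elements ≤ the current one plus one library sort of the prefix (objective:
-- simpler).  A mutates `massive` and `indexes` in place, B mutates them the same way in Python;
-- the equivalence proved here is about the return value.

-- ===== PORT A =====
-- while massive[i] < massive[counter-1]: counter = counter - 1
-- (fuel only makes the recursion total; under Pre_ the loop always stops within the fuel,
--  and the `none` branch — Python's IndexError — is never reached under Pre_)
def pvWhileA (m : List Int) (v : Int) : Int → Nat → Int
  | c, 0 => c
  | c, fuel + 1 =>
    match PySem.List.pyGet? m (c - 1) with
    | some x => if v < x then pvWhileA m v (c - 1) fuel else c
    | none => c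

-- one iteration of the for-loop body, state = (massive, indexes)
def pvStepA (st : List Int × List Int) (i : Int) : List Int × List Int :=
  match PySem.List.pyGet? st.1 i with
  | none => st      -- massive[i] raises IndexError; excluded by Pre_
  | some v =>
    let c := pvWhileA st.1 v i (st.1.length + 1)
    let pos := max c 0
    let m1 := PySem.List.insert st.1 pos v
    let idx1 := st.2 ++ [pos + 1]
    match PySem.List.pop? m1 (i + 1) with
    | some r => (r.2, idx1)
    | none => (m1, idx1)   -- massive.pop(i+1) raises IndexError; excluded by Pre_

def intuitive_sorting (massive : List Int) (length : Int) (indexes : List Int) : List (List Int) :=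
  let st := (PySem.List.pyRange 0 length 1).foldl pvStepA (massive, indexes)
  [st.2, st.1]

-- ===== PORT B =====
def intuitive_sorting_alt (massive : List Int) (length : Int) (indexes : List Int) : List (List Int) :=
  let n : Int := if length > 0 then length else 0
  let pref := PySem.List.slice massive none (some n)
  -- for i, v in enumerate(prefix): indexes.append(sum(1 for u in prefix[:i] if u <= v) + 1)
  -- (the 0/1-generator sum is List.countP)
  let ranks := (PySem.List.enumerate pref).foldl
      (fun acc p =>
        acc ++ [((PySem.List.slice pref none (some p.1)).countP (fun u => decide (u ≤ p.2)) : Int) + 1])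
      indexes
  -- massive[:n] = sorted(prefix): exact, since sorted(prefix) has exactly the slice's length
  let m2 := PySem.List.sorted pref (fun x => x) false ++ PySem.List.slice massive (some n) none
  [ranks, m2]

-- ===== PRECONDITION & SPEC =====
-- Pre_ excludes exactly the inputs where A raises: massive[i] raises IndexError once i reaches
-- len(massive), which happens iff length > len(massive).
def Pre_intuitive_sorting (massive : List Int) (length : Int) (indexes : List Int) : Prop :=
  length ≤ (massive.length : Int)
instance (massive : List Int) (length : Int) (indexes : List Int) : Decidable (Pre_intuitive_sorting massive length indexes) := by unfold Pre_intuitive_sorting; infer_instance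

def pvWitness_intuitive_sorting : List Int × Int × List Int := ([3, 1, 2], 3, [])

def Spec_intuitive_sorting (massive : List Int) (length : Int) (indexes : List Int) (out : List (List Int)) : Prop := out = intuitive_sorting_alt massive length indexes
instance (massive : List Int) (length : Int) (indexes : List Int) (out : List (List Int)) : Decidable (Spec_intuitive_sorting massive length indexes out) := by unfold Spec_intuitive_sorting; infer_instance

-- ===== CLAIM (what is proved, stated in full; the proofs are below) =====
def Claim_equal_intuitive_sorting : Prop := ∀ (massive : List Int) (length : Int) (indexes : List Int), Dom_intuitive_sorting massive length indexes → Pre_intuitive_sorting massive length indexes → Spec_intuitive_sorting massive length indexes (intuitive_sorting massive length indexes)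

-- ===== LEMMAS AND PROOFS =====

-- In a ≤-sorted list the elements ≤ v are exactly the first (countP (· ≤ v)) ones.
lemma pv_sorted_count_iff (s : List Int) (v : Int) (hs : s.Pairwise (· ≤ ·)) (j : Nat)
    (hj : j < s.length) :
    s[j] ≤ v ↔ j < s.countP (fun u => decide (u ≤ v)) := by
  induction s generalizing j with
  | nil => simp at hj
  | cons a t ih =>
    rw [List.pairwise_cons] at hs
    by_cases hav : a ≤ v
    · cases j with
      | zero => simpa [List.countP_cons, hav] using Nat.succ_pos _
      | succ j =>
        simp only [List.getElem_cons_succ, List.countP_cons, hav, decide_true, if_true]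
        rw [ih hs.2 j (by simpa using hj)]
        omega
    · have ht : t.countP (fun u => decide (u ≤ v)) = 0 := by
        rw [List.countP_eq_zero]
        intro u hu
        simp only [decide_eq_true_eq]
        intro huv
        exact hav (le_trans (hs.1 u hu) huv)
      cases j with
      | zero => simp [hav, ht]
      | succ j =>
        have hcnt : (a :: t).countP (fun u => decide (u ≤ v)) = 0 := by
          simp [hav, ht]
        simp only [List.getElem_cons_succ, hcnt]
        constructor
        · intro h
          exact absurd (le_trans (hs.1 _ (List.getElem_mem _)) h) hav
        · intro h
          omega

-- the while loop never increases the counter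
lemma pvWhileA_le (m : List Int) (v : Int) : ∀ (fuel : Nat) (c : Int), pvWhileA m v c fuel ≤ c := by
  intro fuel
  induction fuel with
  | zero => intro c; simp [pvWhileA]
  | succ fuel ih =>
    intro c
    simp only [pvWhileA]
    cases hg : PySem.List.pyGet? m (c - 1) with
    | none => exact le_refl c
    | some x =>
      by_cases hvx : v < x
      · simp only [hvx, if_true]
        exact le_trans (ih (c - 1)) (by omega)
      · simp [hvx]

-- the clamped result of the while loop is the number of prefix elements ≤ v
lemma pvWhileA_count (m : List Int) (i K : Nat) (v : Int)
    (hi : i < m.length) (hv : m[i] = v)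
    (hs : (m.take i).Pairwise (· ≤ ·))
    (hK : (m.take i).countP (fun u => decide (u ≤ v)) = K) :
    ∀ (fuel : Nat) (c : Int), (K : Int) ≤ c → c ≤ (i : Int) → (c - K).toNat < fuel →
      max (pvWhileA m v c fuel) 0 = (K : Int) := by
  have hKi : K ≤ i := by
    rw [← hK]
    exact le_trans List.countP_le_length (by simp [List.length_take])
  intro fuel
  induction fuel with
  | zero => intro c _ _ h; omega
  | succ fuel ih =>
    intro c hKc hci hfuel
    by_cases hc0 : c ≤ 0
    · have hK0 : K = 0 := by omega
      have := pvWhileA_le m v (fuel + 1) c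
      omega
    · -- 0 < c, so the index c-1 is a nonnegative in-prefix index
      have hj : (c - 1).toNat < i := by omega
      have hget : PySem.List.pyGet? m (c - 1) = some m[(c - 1).toNat] := by
        rw [PySem.List.pyGet?_of_nonneg m (show (0:Int) ≤ c - 1 by omega)]
        exact List.getElem?_eq_getElem (by omega : (c - 1).toNat < m.length)
      by_cases hKj : (c - 1).toNat < K
      · -- c = K, the element at K-1 is ≤ v: the loop stops here
        have hle : m[(c - 1).toNat] ≤ v := by
          have h2 := (pv_sorted_count_iff _ v hs ((c - 1).toNat)
            (by simp [List.length_take]; omega)).mpr (by omega)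
          rwa [List.getElem_take] at h2
        simp only [pvWhileA, hget]
        rw [if_neg (by omega)]
        omega
      · -- the element is > v: descend
        have hgt : v < m[(c - 1).toNat] := by
          by_cases h : v < m[(c - 1).toNat]
          · exact h
          · rw [not_lt] at h
            exfalso
            have := (pv_sorted_count_iff _ v hs ((c - 1).toNat)
              (by simp [List.length_take]; omega)).mp (by rw [List.getElem_take]; exact h)
            omega
        simp only [pvWhileA, hget, hgt, if_true]
        exact ih (c - 1) (by omega) (by omega) (by omega)

-- abbreviation used by the proofs: the sorted k-prefix and the rank of position j
def pvSPfx (m : List Int) (k : Nat) : List Int :=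
  PySem.List.sorted (m.take k) (fun x => x) false

def pvRk (m : List Int) (j : Nat) : Int :=
  ((m.take j).countP (fun u => decide (u ≤ m.getD j 0)) : Int) + 1

lemma pv_eraseIdx_append (l1 l2 : List Int) (a : Int) :
    (l1 ++ a :: l2).eraseIdx l1.length = l1 ++ l2 := by
  induction l1 with
  | nil => simp
  | cons x t ih => simp [ih]

lemma pv_mem_take_le (s : List Int) (v : Int) (hp : s.Pairwise (· ≤ ·)) (x : Int)
    (hx : x ∈ s.take (s.countP (fun u => decide (u ≤ v)))) : x ≤ v := by
  obtain ⟨j, hj, rfl⟩ := List.mem_iff_getElem.mp hx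
  have hj' : j < s.countP (fun u => decide (u ≤ v)) := by
    have h2 := hj
    simp only [List.length_take, lt_min_iff] at h2
    exact h2.1
  rw [List.getElem_take]
  exact (pv_sorted_count_iff s v hp j
    (lt_of_lt_of_le hj' List.countP_le_length)).mpr hj'

lemma pv_mem_drop_lt (s : List Int) (v : Int) (hp : s.Pairwise (· ≤ ·)) (y : Int)
    (hy : y ∈ s.drop (s.countP (fun u => decide (u ≤ v)))) : v < y := by
  set K := s.countP (fun u => decide (u ≤ v)) with hK
  obtain ⟨j, hj, rfl⟩ := List.mem_iff_getElem.mp hy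
  have hlen : K + j < s.length := by
    simp only [List.length_drop] at hj
    omega
  rw [List.getElem_drop]
  by_cases h : v < s[K + j]
  · exact h
  · rw [not_lt] at h
    have := (pv_sorted_count_iff s v hp (K + j) hlen).mp h
    omega

lemma pvStepA_eq (m idx : List Int) (k : Nat) (hk : k < m.length) :
    pvStepA (pvSPfx m k ++ m.drop k, idx) (k : Int)
      = (pvSPfx m (k + 1) ++ m.drop (k + 1), idx ++ [pvRk m k]) := by
  have hperm : (pvSPfx m k).Perm (m.take k) := PySem.List.sorted_perm _ _ _
  set s := pvSPfx m k with hs_def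
  have hslen : s.length = k := by
    have h1 := hperm.length_eq
    simp only [List.length_take] at h1
    omega
  have hpair : s.Pairwise (· ≤ ·) := by
    have := PySem.List.sorted_pairwise (xs := m.take k) (key := fun x => x)
    simpa [← hs_def] using this
  set v := m[k] with hv_def
  set K : Nat := s.countP (fun u => decide (u ≤ v)) with hK_def
  have hKk : K ≤ k := le_trans List.countP_le_length (le_of_eq hslen)
  have hdrop : m.drop k = v :: m.drop (k + 1) := List.drop_eq_getElem_cons hk
  have hMlen : (s ++ m.drop k).length = m.length := by
    simp only [List.length_append, hslen, List.length_drop]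
    omega
  have hget : PySem.List.pyGet? (s ++ m.drop k) (k : Int) = some v := by
    rw [hdrop, show ((k : Nat) : Int) = ((s.length : Nat) : Int) by rw [hslen]]
    exact PySem.List.pyGet?_append_length s _ v
  have htake : (s ++ m.drop k).take k = s := by
    rw [← hslen]
    exact List.take_left
  have hMk : (s ++ m.drop k)[k]'(by omega) = v := by
    have h1 := hget
    rw [PySem.List.pyGet?_of_nonneg (s ++ m.drop k) (by omega : (0:Int) ≤ (k : Nat))] at h1
    simp only [Int.toNat_natCast] at h1
    exact (List.getElem?_eq_some_iff.mp h1).2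
  have hwhile := pvWhileA_count (s ++ m.drop k) k K v (by omega) hMk
      (by rw [htake]; exact hpair) (by rw [htake])
      ((s ++ m.drop k).length + 1) (k : Int)
      (by exact_mod_cast hKk) (le_refl _) (by omega)
  -- the new sorted prefix
  have hperm' : (s.take K ++ v :: s.drop K).Perm (m.take (k + 1)) := by
    have h1 : (s.take K ++ v :: s.drop K).Perm (v :: s) := by
      have h0 := List.perm_middle (a := v) (l₁ := s.take K) (l₂ := s.drop K)
      rwa [List.take_append_drop] at h0
    have h2 : (v :: m.take k).Perm (m.take (k + 1)) := by
      rw [List.take_succ_eq_append_getElem hk]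
      exact (List.perm_append_singleton v (m.take k)).symm
    exact h1.trans ((hperm.cons v).trans h2)
  have hpair' : (s.take K ++ v :: s.drop K).Pairwise (· ≤ ·) := by
    rw [List.pairwise_append]
    refine ⟨hpair.sublist (List.take_sublist K s), ?_, ?_⟩
    · rw [List.pairwise_cons]
      exact ⟨fun y hy => le_of_lt (pv_mem_drop_lt s v hpair y hy),
        hpair.sublist (List.drop_sublist K s)⟩
    · intro a ha b hb
      have ha' : a ≤ v := pv_mem_take_le s v hpair a ha
      rcases List.mem_cons.mp hb with rfl | hb'
      · exact ha'
      · exact le_trans ha' (le_of_lt (pv_mem_drop_lt s v hpair b hb'))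
  have hnew : pvSPfx m (k + 1) = s.take K ++ v :: s.drop K :=
    PySem.List.sorted_id_eq_of_perm_of_pairwise (m.take (k + 1)) _ hperm' hpair'
  -- now evaluate the step
  simp only [pvStepA, hget, hwhile]
  rw [PySem.List.insert_natCast (s ++ m.drop k) K v (by omega)]
  rw [List.take_append_of_le_length (by omega), List.drop_append_of_le_length (by omega)]
  rw [hdrop]
  have hassoc : s.take K ++ v :: (s.drop K ++ v :: m.drop (k + 1))
      = (s.take K ++ v :: s.drop K) ++ v :: m.drop (k + 1) := by
    simp
  rw [hassoc]
  have hlen' : (s.take K ++ v :: s.drop K).length = k + 1 := by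
    simp only [List.length_append, List.length_cons, List.length_take,
      List.length_drop, hslen]
    omega
  have hpop : PySem.List.pop? ((s.take K ++ v :: s.drop K) ++ v :: m.drop (k + 1)) ((k : Int) + 1)
      = some ((((s.take K ++ v :: s.drop K) ++ v :: m.drop (k + 1)))[k + 1]'(by
          simp only [List.length_append, hlen', List.length_cons, List.length_drop]; omega),
        (((s.take K ++ v :: s.drop K) ++ v :: m.drop (k + 1))).eraseIdx (k + 1)) := by
    rw [show ((k : Nat) : Int) + 1 = (((k + 1 : Nat)) : Int) by push_cast; ring]
    exact PySem.List.pop?_natCast _ (k + 1) (by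
      simp only [List.length_append, hlen', List.length_cons, List.length_drop]
      omega)
  rw [hpop]
  have herase : (((s.take K ++ v :: s.drop K) ++ v :: m.drop (k + 1))).eraseIdx (k + 1)
      = (s.take K ++ v :: s.drop K) ++ m.drop (k + 1) := by
    rw [show k + 1 = (s.take K ++ v :: s.drop K).length by rw [hlen']]
    exact pv_eraseIdx_append _ _ v
  rw [herase]
  dsimp only
  rw [hnew]
  congr 2
  -- the appended index: pos + 1 = pvRk m k
  unfold pvRk
  rw [List.getD_eq_getElem m 0 hk, ← hv_def, ← (hperm.countP_eq _), ← hK_def]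

lemma pv_foldl_inv (m idx : List Int) (k : Nat) (hk : k ≤ m.length) :
    (PySem.List.pyRange 0 (k : Int) 1).foldl pvStepA (m, idx)
      = (pvSPfx m k ++ m.drop k, idx ++ (List.range k).map (fun j => pvRk m j)) := by
  induction k with
  | zero =>
    simp [PySem.List.pyRange_one_eq_nil, pvSPfx, PySem.List.sorted]
  | succ k ih =>
    have hk' : k ≤ m.length := by omega
    have : ((k : Int) + 1) = ((k + 1 : Nat) : Int) := by push_cast; ring
    rw [← this, PySem.List.pyRange_one_succ_right (by omega), List.foldl_append,
      ih hk']
    simp only [List.foldl_cons, List.foldl_nil]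
    rw [pvStepA_eq m _ k (by omega)]
    congr 1
    rw [List.range_succ, List.map_append, List.map_cons, List.map_nil, List.append_assoc]

-- B's rank list is exactly the list of per-step ranks A appends
lemma pv_alt_ranks (m : List Int) (k : Nat) (hk : k ≤ m.length) :
    (PySem.List.enumerate (m.take k)).map
        (fun p => ((PySem.List.slice (m.take k) none (some p.1)).countP
            (fun u => decide (u ≤ p.2)) : Int) + 1)
      = (List.range k).map (fun j => pvRk m j) := by
  apply List.ext_getElem
  · simp [PySem.List.length_enumerate, List.length_take, List.length_range]
    omega
  · intro j h1 h2
    have hjk : j < k := by simpa using h2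
    have hjlen : j < (m.take k).length := by
      simp only [List.length_take]
      omega
    rw [List.getElem_map, List.getElem_map, PySem.List.getElem_enumerate, List.getElem_range]
    have hz : (0 : Int) + (j : Int) = ((j : Nat) : Int) := by push_cast; ring
    rw [hz, PySem.List.slice_to_natCast]
    unfold pvRk
    rw [List.take_take, min_eq_left (le_of_lt hjk), List.getElem_take,
      List.getD_eq_getElem m 0 (by omega)]

theorem intuitive_sorting_spec : Claim_equal_intuitive_sorting := by
  intro massive length indexes _ hpre
  unfold Pre_intuitive_sorting at hpre
  unfold Spec_intuitive_sorting intuitive_sorting intuitive_sorting_alt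
  dsimp only
  by_cases hL : 0 < length
  · have hcast : length = ((length.toNat : Nat) : Int) := by omega
    have hk : length.toNat ≤ massive.length := by omega
    rw [hcast, pv_foldl_inv massive indexes length.toNat hk]
    rw [if_pos (by omega), hcast]
    simp only [Int.toNat_natCast]
    rw [PySem.List.slice_to_natCast, PySem.List.slice_from_natCast]
    rw [PySem.List.foldl_append_singleton_eq_map, pv_alt_ranks massive length.toNat hk]
    rfl
  · rw [PySem.List.pyRange_one_eq_nil (by omega), List.foldl_nil]
    rw [if_neg hL, show (0 : Int) = ((0 : Nat) : Int) from rfl,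
      PySem.List.slice_to_natCast, PySem.List.slice_from_natCast]
    simp [PySem.List.sorted]
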